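-- pv_equiv track=rewrite | github.com/hsa-ees/asterics | tools/as-automatics/as_automatics_helpers.py | strip_name
-- ===== SOURCE A (Python) =====
-- from typing import Sequence
--
-- def strip_name(code_name: str, to_strip: Sequence[str],
--                ignored_keywords: Sequence[str]) -> [str, str]:
--     """Remove 'ignored_keywords' from the name along with all matching strings
--        in the list 'to_strip'. Assumes that the name fragments are delimited
--        with '_'."""
--     out = ""
--     if any([keyword in code_name for keyword in ignored_keywords]):
--         # Remove the ignored keywords from the code name
--         temp = code_name.split('_')
--         while temp[0] in ignored_keywords:
--             del temp[0]
--         temp.reverse()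
--         while temp[0] in ignored_keywords:
--             del temp[0]
--         temp.reverse()
--         # Rebuild the string:
--         for string in temp:
--             if out == "":
--                 out = string
--             else:
--                 out = out + "_" + string
--     else:
--         # If there's no ignored keywords to remove
--         out = code_name
--
--     # Replace the strings to (potentially) remove with emtpy strings
--     for string in to_strip:
--         out = out.replace(string, "", 1)
--
--     return out
-- ===== SOURCE B (Python) =====
-- def strip_name(code_name, to_strip, ignored_keywords):
--     """Trim ignored_keywords fragments off both ends of the underscore-
--     delimited name, then drop each to_strip string once."""
--     if any(keyword in code_name for keyword in ignored_keywords):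
--         frags = code_name.split('_')
--         ign = set(ignored_keywords)
--         keep = [i for i, f in enumerate(frags) if f not in ign]
--         out = '_'.join(frags[keep[0]:keep[-1] + 1]).lstrip('_') if keep else ''
--     else:
--         out = code_name
--     for string in to_strip:
--         out = out.replace(string, '', 1)
--     return out
-- ===== Notes on version B (the rewrite author's own statement) =====
-- stated objective: simpler
-- what changed: Replaces A's destructive while-del front trim / reverse / trim / reverse and its manual string-rebuild accumulator with computing the kept fragment indices once (enumerate + set filter) and joining the slice between the first and last kept index, lstrip('_') standing in for the rebuild's skipping of leading empty fragments.
-- crash fix: When some ignored keyword occurs in code_name but every underscore-delimited fragment is an ignored keyword (e.g. ('a', [], ['a'])), A raises IndexError on the emptied fragment list; B returns ''. — e.g. on strip_name("a", [], ["a"]): A raises IndexError, B returns ""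
import Mathlib
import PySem

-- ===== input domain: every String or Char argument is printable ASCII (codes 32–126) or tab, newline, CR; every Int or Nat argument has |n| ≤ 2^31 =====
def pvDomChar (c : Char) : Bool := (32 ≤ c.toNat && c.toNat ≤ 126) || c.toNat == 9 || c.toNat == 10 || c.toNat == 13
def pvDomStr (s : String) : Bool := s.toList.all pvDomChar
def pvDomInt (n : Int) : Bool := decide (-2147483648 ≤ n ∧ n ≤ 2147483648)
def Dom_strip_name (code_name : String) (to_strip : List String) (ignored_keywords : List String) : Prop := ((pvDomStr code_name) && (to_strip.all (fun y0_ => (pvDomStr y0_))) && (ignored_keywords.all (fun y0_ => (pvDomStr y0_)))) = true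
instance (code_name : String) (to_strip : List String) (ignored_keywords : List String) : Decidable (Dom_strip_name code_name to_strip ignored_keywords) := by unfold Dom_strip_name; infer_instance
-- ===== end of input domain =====

-- B replaces A's while-del front trim / reverse / trim / reverse and manual rebuild
-- accumulator with computing the kept fragment indices once and joining the slice between
-- the first and last kept index (objective: simpler).

-- ===== PORT A =====
-- out.replace(old, "", 1): remove the first occurrence of old (exact, incl. old = "")
def pvReplace1 (s old : List Char) : List Char :=
  if PySem.Chars.isIn old s then
    s.take (PySem.Chars.find s old).toNat ++ s.drop ((PySem.Chars.find s old).toNat + old.length)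
  else s

-- 'while temp[0] in ignored_keywords: del temp[0]' (Python raises IndexError on the
-- emptied list; that input is excluded by Pre_ below, the port returns [] there)
def pvTrimFront (kw : List (List Char)) : List (List Char) → List (List Char)
  | [] => []
  | x :: xs => if kw.contains x then pvTrimFront kw xs else x :: xs

-- the body of A's if-branch: trim front, reverse, trim, reverse back, rebuild by hand
def pvStripCoreA (cs : List Char) (kw : List (List Char)) : List Char :=
  let temp := PySem.Chars.splitOn cs ['_']
  let temp := pvTrimFront kw temp
  let temp := (pvTrimFront kw temp.reverse).reverse
  temp.foldl (fun out s => if out = [] then s else out ++ '_' :: s) []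

def strip_name (code_name : String) (to_strip : List String) (ignored_keywords : List String) : String :=
  let cs := code_name.toList
  let kw := ignored_keywords.map (fun k => k.toList)
  let out :=
    if ignored_keywords.any (fun keyword => PySem.Chars.isIn keyword.toList cs) then
      pvStripCoreA cs kw
    else cs
  String.ofList (to_strip.foldl (fun out s => pvReplace1 out s.toList) out)

-- ===== PORT B =====
-- the body of B's if-branch: kept indices via enumerate + set filter, then join the slice
def pvStripCoreB (cs : List Char) (kw : List (List Char)) : List Char :=
  let frags := PySem.Chars.splitOn cs ['_']
  let ign : PySem.Set (List Char) := PySem.Set.ofList kw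
  let keep := ((PySem.List.enumerate frags).filter
    (fun q => !(PySem.Set.contains ign q.2))).map Prod.fst
  match keep with
  | [] => []
  | lo :: rest =>
    -- .lstrip('_'): exact — drops exactly the leading '_' characters
    (PySem.Chars.join ['_']
      (PySem.List.slice frags (some lo) (some (rest.getLastD lo + 1)))).dropWhile
        (fun c => c == '_')

def strip_name_alt (code_name : String) (to_strip : List String) (ignored_keywords : List String) : String :=
  let cs := code_name.toList
  let out :=
    if ignored_keywords.any (fun keyword => PySem.Chars.isIn keyword.toList cs) then
      pvStripCoreB cs (ignored_keywords.map (fun k => k.toList))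
    else cs
  String.ofList (to_strip.foldl (fun out s => pvReplace1 out s.toList) out)

-- ===== PRECONDITION & SPEC =====
-- Pre_ excludes exactly the inputs where A raises IndexError: some ignored keyword occurs
-- in code_name but every underscore-delimited fragment is an ignored keyword.
def Pre_strip_name (code_name : String) (to_strip : List String) (ignored_keywords : List String) : Prop :=
  ignored_keywords.any (fun keyword => PySem.Chars.isIn keyword.toList code_name.toList) = true →
    (PySem.Chars.splitOn code_name.toList ['_']).any
      (fun f => !(ignored_keywords.map (fun k => k.toList)).contains f) = true
instance (code_name : String) (to_strip : List String) (ignored_keywords : List String) : Decidable (Pre_strip_name code_name to_strip ignored_keywords) := by unfold Pre_strip_name; infer_instance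

def pvWitness_strip_name : String × List String × List String := ("sig_a_vector", ["a_"], ["sig"])

def Spec_strip_name (code_name : String) (to_strip : List String) (ignored_keywords : List String) (out : String) : Prop := out = strip_name_alt code_name to_strip ignored_keywords
instance (code_name : String) (to_strip : List String) (ignored_keywords : List String) (out : String) : Decidable (Spec_strip_name code_name to_strip ignored_keywords out) := by unfold Spec_strip_name; infer_instance

-- When some ignored keyword occurs in code_name but every fragment is an ignored keyword,
-- A raises IndexError on the emptied fragment list; B returns "".
def Raises_strip_name (code_name : String) (to_strip : List String) (ignored_keywords : List String) : Prop :=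
  ignored_keywords.any (fun keyword => PySem.Chars.isIn keyword.toList code_name.toList) = true ∧
  (PySem.Chars.splitOn code_name.toList ['_']).all
    (fun f => (ignored_keywords.map (fun k => k.toList)).contains f) = true
instance (code_name : String) (to_strip : List String) (ignored_keywords : List String) : Decidable (Raises_strip_name code_name to_strip ignored_keywords) := by unfold Raises_strip_name; infer_instance
def pvRaiseWitness_strip_name : String × List String × List String := ("a", [], ["a"])
def pvRaiseWitnessOut_strip_name : String := ""

-- ===== CLAIM (what is proved, stated in full; the proofs are below) =====
def Claim_equal_strip_name : Prop := ∀ (code_name : String) (to_strip : List String) (ignored_keywords : List String), Dom_strip_name code_name to_strip ignored_keywords → Pre_strip_name code_name to_strip ignored_keywords → Spec_strip_name code_name to_strip ignored_keywords (strip_name code_name to_strip ignored_keywords)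
def Claim_raises_strip_name : Prop := (∀ (code_name : String) (to_strip : List String) (ignored_keywords : List String), Dom_strip_name code_name to_strip ignored_keywords → Raises_strip_name code_name to_strip ignored_keywords → ¬ Pre_strip_name code_name to_strip ignored_keywords) ∧ (Dom_strip_name (pvRaiseWitness_strip_name.1) (pvRaiseWitness_strip_name.2.1) (pvRaiseWitness_strip_name.2.2) ∧ Raises_strip_name (pvRaiseWitness_strip_name.1) (pvRaiseWitness_strip_name.2.1) (pvRaiseWitness_strip_name.2.2) ∧ strip_name_alt (pvRaiseWitness_strip_name.1) (pvRaiseWitness_strip_name.2.1) (pvRaiseWitness_strip_name.2.2) = pvRaiseWitnessOut_strip_name)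

-- ===== LEMMAS AND PROOFS =====

-- the while-del front trim is dropWhile
theorem pvTrimFront_eq_dropWhile (kw : List (List Char)) (l : List (List Char)) :
    pvTrimFront kw l = l.dropWhile (fun x => kw.contains x) := by
  induction l with
  | nil => rfl
  | cons x xs ih => simp only [pvTrimFront, List.dropWhile_cons]; split <;> simp_all

-- set(ignored_keywords) membership agrees with list membership
theorem pvSetContains (kw : List (List Char)) (f : List Char) :
    PySem.Set.contains (PySem.Set.ofList kw) f = kw.contains f := by
  by_cases h : f ∈ kw <;>
    simp [PySem.Set.contains, PySem.Set.mem_ofList, h]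

-- the head fragment surviving dropWhile fails the predicate
theorem pvDropWhile_head_false (p : List Char → Bool) (l : List (List Char))
    (x0 : List Char) (d' : List (List Char)) (h : l.dropWhile p = x0 :: d') :
    p x0 = false := by
  induction l with
  | nil => simp at h
  | cons a t ih =>
    rw [List.dropWhile_cons] at h
    by_cases hpa : p a = true
    · rw [if_pos hpa] at h; exact ih h
    · rw [if_neg hpa] at h
      injection h with h1 h2
      rw [← h1]
      simpa using hpa

-- enumerate of an all-ignored block filters to nothing
theorem pvFilter_enumerate_all (p : List Char → Bool) (u : List (List Char)) (s : Int)
    (hu : ∀ x ∈ u, p x) :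
    (PySem.List.enumerate u s).filter (fun q => !p q.2) = [] := by
  induction u generalizing s with
  | nil => simp [PySem.List.enumerate_nil]
  | cons x xs ih =>
    have hx : p x := hu x (by simp)
    simp [PySem.List.enumerate_cons, hx, ih _ (fun y hy => hu y (by simp [hy]))]

-- last kept index of a block whose last element is kept
theorem pvFilter_enumerate_getLast (p : List Char → Bool) (m : List (List Char))
    (hlast : m.getLast?.any (fun x => !p x) = true) (s : Int) :
    (((PySem.List.enumerate m s).filter (fun q => !p q.2)).map Prod.fst).getLast?
      = some (s + m.length - 1) := by
  induction m generalizing s with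
  | nil => simp at hlast
  | cons x xs ih =>
    cases xs with
    | nil =>
      simp only [List.getLast?_singleton, Option.any_some] at hlast
      simp [PySem.List.enumerate_cons, PySem.List.enumerate_nil, hlast]
    | cons y t =>
      have hlast' : (y :: t).getLast?.any (fun x => !p x) = true := by
        rwa [List.getLast?_cons_cons] at hlast
      have hrec := ih hlast' (s + 1)
      have hne : (((PySem.List.enumerate (y :: t) (s + 1)).filter (fun q => !p q.2)).map Prod.fst) ≠ [] := by
        intro h; rw [h] at hrec; simp at hrec
      have hcons : ∀ (a : Int) (L : List Int), L ≠ [] → (a :: L).getLast? = L.getLast? := by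
        intro a L hL
        cases L with
        | nil => exact absurd rfl hL
        | cons b u => exact List.getLast?_cons_cons
      rw [PySem.List.enumerate_cons, List.filter_cons]
      by_cases hx : (!p x) = true
      · rw [if_pos hx, List.map_cons, hcons _ _ hne, hrec]
        congr 1
        simp only [List.length_cons]
        push_cast
        ring
      · rw [if_neg hx, hrec]
        congr 1
        simp only [List.length_cons]
        push_cast
        ring

-- kept-index characterisation on an explicit u ++ (x :: m') ++ w decomposition
theorem pv_keep_core (p : List Char → Bool) (u : List (List Char)) (x : List Char)
    (m' w : List (List Char))
    (hall_u : ∀ y ∈ u, p y) (hall_w : ∀ y ∈ w, p y) (hx : p x = false)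
    (hlastm : (x :: m').getLast?.any (fun z => !p z) = true) :
    (((PySem.List.enumerate (u ++ ((x :: m') ++ w))).filter (fun q => !p q.2)).map Prod.fst).head?
        = some (u.length : Int) ∧
    (((PySem.List.enumerate (u ++ ((x :: m') ++ w))).filter (fun q => !p q.2)).map Prod.fst).getLast?
        = some ((u.length : Int) + (x :: m').length - 1) ∧
    PySem.List.slice (u ++ ((x :: m') ++ w)) (some (u.length : Int))
        (some ((u.length : Int) + ((x :: m').length : Int)))
      = x :: m' := by
  have hfilter : ((PySem.List.enumerate (u ++ ((x :: m') ++ w))).filter (fun q => !p q.2))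
      = ((PySem.List.enumerate (x :: m') (u.length : Int)).filter (fun q => !p q.2)) := by
    rw [PySem.List.enumerate_append, List.filter_append, pvFilter_enumerate_all p u 0 hall_u,
        List.nil_append, PySem.List.enumerate_append, List.filter_append,
        pvFilter_enumerate_all p w _ hall_w, List.append_nil]
    norm_num
  refine ⟨?_, ?_, ?_⟩
  · rw [hfilter, PySem.List.enumerate_cons, List.filter_cons, if_pos (by simp [hx])]
    simp
  · rw [hfilter, pvFilter_enumerate_getLast p (x :: m') hlastm]
  · rw [PySem.List.slice_natCast_add, List.drop_left, List.take_left]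

-- kept-index characterisation: head, last, and the slice between them
theorem pv_keep (p : List Char → Bool) (l : List (List Char))
    (hex : ∃ f ∈ l, ¬ p f) :
    (((PySem.List.enumerate l).filter (fun q => !p q.2)).map Prod.fst).head?
        = some ((l.takeWhile p).length : Int) ∧
    (((PySem.List.enumerate l).filter (fun q => !p q.2)).map Prod.fst).getLast?
        = some (((l.takeWhile p).length : Int) + ((l.dropWhile p).rdropWhile p).length - 1) ∧
    PySem.List.slice l (some ((l.takeWhile p).length : Int))
        (some (((l.takeWhile p).length : Int) + (((l.dropWhile p).rdropWhile p).length : Int)))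
      = (l.dropWhile p).rdropWhile p := by
  obtain ⟨f, hfl, hpf⟩ := hex
  have hld : l = l.takeWhile p ++ l.dropWhile p :=
    (List.takeWhile_append_dropWhile (p := p) (l := l)).symm
  have hfd : f ∈ l.dropWhile p := by
    rcases List.mem_append.mp (by rw [← hld]; exact hfl) with h | h
    · exact absurd (List.mem_takeWhile_imp h) hpf
    · exact h
  have hdne : l.dropWhile p ≠ [] := List.ne_nil_of_mem hfd
  have hmne : (l.dropWhile p).rdropWhile p ≠ [] := by
    intro h; exact hpf (List.rdropWhile_eq_nil_iff.mp h f hfd)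
  rcases hmm : (l.dropWhile p).rdropWhile p with _ | ⟨x, m'⟩
  · exact absurd hmm hmne
  · rcases hdd : l.dropWhile p with _ | ⟨x0, d'⟩
    · rw [hdd] at hfd; simp at hfd
    · have hx : p x = false := by
        have hpre := List.rdropWhile_prefix p (l.dropWhile p)
        rw [hmm, hdd, List.cons_prefix_cons] at hpre
        obtain ⟨heq, -⟩ := hpre
        rw [heq]
        exact pvDropWhile_head_false p l x0 d' hdd
      have hlastm : (x :: m').getLast?.any (fun z => !p z) = true := by
        have hl1 := List.rdropWhile_last_not p (l.dropWhile p) hmne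
        have hl2 := List.getLast?_eq_some_getLast hmne
        conv at hl2 => lhs; rw [hmm]
        rw [hl2]
        simpa using hl1
      have hdmw : l.dropWhile p = (x :: m') ++ (l.dropWhile p).rtakeWhile p := by
        conv_lhs => rw [← List.rdropWhile_append_rtakeWhile (p := p) (l := l.dropWhile p)]
        rw [hmm]
      have hl2 : l = l.takeWhile p ++ ((x :: m') ++ (l.dropWhile p).rtakeWhile p) := by
        rw [← hdmw]; exact hld
      have hcore := pv_keep_core p (l.takeWhile p) x m' ((l.dropWhile p).rtakeWhile p)
        (fun y hy => List.mem_takeWhile_imp hy) (fun y hy => List.mem_rtakeWhile_imp hy)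
        hx hlastm
      rw [← hl2] at hcore
      exact hcore

-- the hand rebuild with a nonempty accumulator appends '_'-prefixed fragments
theorem pvRebuild_acc (rest : List (List Char)) (acc : List Char) (hacc : acc ≠ []) :
    rest.foldl (fun out s => if out = [] then s else out ++ '_' :: s) acc
      = acc ++ rest.flatMap (fun s => '_' :: s) := by
  induction rest generalizing acc with
  | nil => simp
  | cons y t ih =>
    simp only [List.foldl_cons, if_neg hacc, List.flatMap_cons]
    rw [ih (acc ++ '_' :: y) (by simp)]
    simp

-- '_'.join in flatMap form
theorem pvJoin_cons (x : List Char) (rest : List (List Char)) :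
    PySem.Chars.join ['_'] (x :: rest) = x ++ rest.flatMap (fun s => '_' :: s) := by
  induction rest generalizing x with
  | nil => simp [PySem.Chars.join_singleton]
  | cons y t ih =>
    rw [PySem.Chars.join_cons_cons, ih y]
    simp

-- no fragment produced by split('_') contains an underscore (invariant of splitOn.go)
theorem pvSplitOn_go_nounder (fuel : Nat) (l cur : List Char) (acc : List (List Char))
    (hf : l.length < fuel) (hcur : '_' ∉ cur) (hacc : ∀ f ∈ acc, '_' ∉ f) :
    ∀ f ∈ PySem.Chars.splitOn.go ['_'] fuel l cur acc, '_' ∉ f := by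
  induction fuel generalizing l cur acc with
  | zero => omega
  | succ fuel ih =>
    cases l with
    | nil =>
      intro f hfm
      simp only [PySem.Chars.splitOn.go] at hfm
      rw [List.mem_reverse] at hfm
      rcases List.mem_cons.mp hfm with rfl | hfa
      · simpa using hcur
      · exact hacc f hfa
    | cons c rest =>
      intro f hfm
      simp only [PySem.Chars.splitOn.go] at hfm
      by_cases hc : (['_'].isPrefixOf (c :: rest)) = true
      · rw [if_pos hc] at hfm
        refine ih _ [] _ (by simp only [List.length_drop, List.length_cons, List.length_nil] at hf ⊢; omega) (by simp) ?_ f hfm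
        intro g hg
        rcases List.mem_cons.mp hg with rfl | hga
        · simpa using hcur
        · exact hacc g hga
      · rw [if_neg hc] at hfm
        have hcne : c ≠ '_' := by
          intro hceq
          apply hc
          rw [← hceq]
          simp [List.isPrefixOf]
        refine ih rest (c :: cur) acc (by simpa using hf) ?_ hacc f hfm
        intro hmem
        rcases List.mem_cons.mp hmem with h | h
        · exact hcne h.symm
        · exact hcur h

theorem pvSplitOn_nounder (cs : List Char) :
    ∀ f ∈ PySem.Chars.splitOn cs ['_'], '_' ∉ f :=
  pvSplitOn_go_nounder (cs.length + 1) cs [] [] (by omega) (by simp) (by simp)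

-- the rebuild equals '_'.join(...).lstrip('_') on underscore-free fragments
theorem pvRebuild_eq_lstrip (m : List (List Char)) (hm : m ≠ [])
    (hnou : ∀ f ∈ m, '_' ∉ f) :
    m.foldl (fun out s => if out = [] then s else out ++ '_' :: s) []
      = (PySem.Chars.join ['_'] m).dropWhile (fun c => c == '_') := by
  induction m with
  | nil => exact absurd rfl hm
  | cons x rest ih =>
    by_cases hx : x = []
    · subst hx
      cases rest with
      | nil => decide
      | cons y t =>
        have hrec := ih (by simp) (fun f hf => hnou f (List.mem_cons_of_mem _ hf))
        rw [List.foldl_cons, if_pos rfl, hrec, PySem.Chars.join_cons_cons]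
        simp
    · obtain ⟨c, x', rfl⟩ : ∃ c x', x = c :: x' := by
        cases x with
        | nil => exact absurd rfl hx
        | cons a b => exact ⟨a, b, rfl⟩
      have hc : c ≠ '_' := by
        have h := hnou (c :: x') (by simp)
        intro hceq
        exact h (by rw [hceq]; simp)
      rw [List.foldl_cons, if_pos rfl, pvRebuild_acc rest (c :: x') (by simp), pvJoin_cons]
      rw [List.cons_append, List.dropWhile_cons]
      simp [hc]

-- the two branch bodies agree wherever some fragment survives
theorem pvCore_eq (cs : List Char) (kw : List (List Char))
    (hex : ∃ f ∈ PySem.Chars.splitOn cs ['_'], ¬ (kw.contains f = true)) :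
    pvStripCoreA cs kw = pvStripCoreB cs kw := by
  classical
  set p : List Char → Bool := fun f => kw.contains f with hp
  set l := PySem.Chars.splitOn cs ['_'] with hl
  have hmrev : ((l.dropWhile p).reverse.dropWhile p).reverse = (l.dropWhile p).rdropWhile p := rfl
  obtain ⟨hhead, hlast, hslice⟩ := pv_keep p l hex
  have hA : pvStripCoreA cs kw
      = ((l.dropWhile p).rdropWhile p).foldl
          (fun out s => if out = [] then s else out ++ '_' :: s) [] := by
    simp only [pvStripCoreA, pvTrimFront_eq_dropWhile, ← hl, ← hp, hmrev]
  have hmne : (l.dropWhile p).rdropWhile p ≠ [] := by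
    intro h
    obtain ⟨f, hfl, hpf⟩ := hex
    have hfd : f ∈ l.dropWhile p := by
      rcases List.mem_append.mp
          (by rw [List.takeWhile_append_dropWhile (p := p) (l := l)]; exact hfl) with hin | hin
      · exact absurd (List.mem_takeWhile_imp hin) hpf
      · exact hin
    exact hpf (List.rdropWhile_eq_nil_iff.mp h f hfd)
  have hpred : (fun q : Int × List Char => !(PySem.Set.contains (PySem.Set.ofList kw) q.2))
      = (fun q : Int × List Char => !p q.2) := by
    funext q; rw [pvSetContains]
  have hB : pvStripCoreB cs kw
      = (PySem.Chars.join ['_'] ((l.dropWhile p).rdropWhile p)).dropWhile (fun c => c == '_') := by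
    rw [pvStripCoreB]
    simp only [← hl, hpred]
    set keep := ((PySem.List.enumerate l).filter (fun q => !p q.2)).map Prod.fst with hkeep
    obtain ⟨lo, rest, hkr⟩ : ∃ lo rest, keep = lo :: rest := by
      cases hk : keep with
      | nil => rw [hk] at hhead; simp at hhead
      | cons a b => exact ⟨a, b, rfl⟩
    rw [hkr]
    show (PySem.Chars.join ['_']
        (PySem.List.slice l (some lo) (some (rest.getLastD lo + 1)))).dropWhile (fun c => c == '_')
      = (PySem.Chars.join ['_'] ((l.dropWhile p).rdropWhile p)).dropWhile (fun c => c == '_')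
    have hgld : rest.getLastD lo
        = ((l.takeWhile p).length : Int) + ((l.dropWhile p).rdropWhile p).length - 1 := by
      have h := hlast
      rw [hkr, List.getLast?_cons] at h
      have h2 := Option.some.inj h
      rw [← h2]
      cases rest with
      | nil => rfl
      | cons b u => rw [List.getLastD_eq_getLast?]
    have hlo : lo = (((l.takeWhile p).length : Int)) := by
      have h := hhead
      rw [hkr] at h
      simpa using h
    rw [hgld, hlo]
    have harith : (((l.takeWhile p).length : Int) + ((l.dropWhile p).rdropWhile p).length - 1 + 1 : Int)
        = ((l.takeWhile p).length : Int) + (((l.dropWhile p).rdropWhile p).length : Int) := by ring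
    rw [harith, hslice]
  rw [hA, hB]
  apply pvRebuild_eq_lstrip ((l.dropWhile p).rdropWhile p) hmne
  intro f hf
  have h1 : f ∈ l.dropWhile p := ((List.rdropWhile_prefix p (l.dropWhile p)).sublist).subset hf
  have h2 : f ∈ l := ((List.dropWhile_suffix p).sublist).subset h1
  exact pvSplitOn_nounder cs f h2

-- ===== VERDICT (by name: the statement is the Claim_ definition above) =====
theorem strip_name_spec : Claim_equal_strip_name := by
  intro code_name to_strip ignored_keywords hDom hPre
  show strip_name code_name to_strip ignored_keywords
      = strip_name_alt code_name to_strip ignored_keywords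
  simp only [strip_name, strip_name_alt]
  by_cases hb : ignored_keywords.any
      (fun keyword => PySem.Chars.isIn keyword.toList code_name.toList) = true
  · have hex : ∃ f ∈ PySem.Chars.splitOn code_name.toList ['_'],
        ¬ ((ignored_keywords.map (fun k => k.toList)).contains f = true) := by
      have h := hPre hb
      rw [List.any_eq_true] at h
      obtain ⟨f, hf, hpf⟩ := h
      exact ⟨f, hf, by simpa using hpf⟩
    simp only [hb, if_true]
    rw [pvCore_eq code_name.toList (ignored_keywords.map (fun k => k.toList)) hex]
  · simp only [hb]
    simp

@[simp] theorem strip_name_raises : Claim_raises_strip_name := by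
  unfold Claim_raises_strip_name
  constructor
  · intro code_name to_strip ignored_keywords hDom hR hPre
    obtain ⟨hb, hall⟩ := hR
    have hany := hPre hb
    rw [List.any_eq_true] at hany
    obtain ⟨f, hf, hpf⟩ := hany
    rw [List.all_eq_true] at hall
    have := hall f hf
    simp_all
  · exact ⟨by decide, by decide, by decide⟩
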